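-- pv_equiv track=rewrite | github.com/malikinss/PyGen | PyGen for Advanced/4_nested_lists/4_4_matrices_part_1/4_4_6_find_max_diagonal_area/4_4_6_find_max_diagonal_area.py | find_max_diagonal_area
-- ===== SOURCE A (Python) =====
-- from typing import List
--
-- def find_max_diagonal_area(matrix: List[List[int]]) -> int:
--     """
--     Finds the maximum element to the left and right of the main
--     and secondary diagonals.
--
--     Args:
--         matrix (List[List[int]]): Square matrix.
--
--     Returns:
--         int: Maximum element from the specified areas.
--     """
--     n = len(matrix)
--     selected_elements = []
--
--     for i in range(n):
--         for j in range(n):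
--             # Conditions to select elements on and around both diagonals
--             if (i >= j and i <= n - 1 - j) or (i <= j and i >= n - 1 - j):
--                 selected_elements.append(matrix[i][j])
--
--     return max(selected_elements)
-- ===== SOURCE B (Python) =====
-- def find_max_diagonal_area(matrix):
--     """Running max over per-row index ranges computed from the diagonals,
--     visiting only the qualifying cells (no per-cell boolean test)."""
--     n = len(matrix)
--     best = None
--     for i, row in enumerate(matrix):
--         lo = min(i, n - 1 - i)
--         hi = max(i, n - 1 - i)
--         start = max(hi, lo + 1)  # skip the centre cell already seen in the prefix
--         for j in range(lo + 1):
--             if best is None or best < row[j]: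
--                 best = row[j]
--         for j in range(start, n):
--             if best is None or best < row[j]:
--                 best = row[j]
--     return best
-- ===== Notes on version B (the rewrite author's own statement) =====
-- stated objective: alternative
-- what changed: A scans all n^2 cells testing a diagonal-membership predicate and builds a list for max(); B computes per-row index bounds lo/hi analytically, visits only the qualifying cells, and keeps a running maximum with no list and no per-cell test.
-- outside the precondition, e.g. on find_max_diagonal_area([]): A raises ValueError, B returns None
import Mathlib
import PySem

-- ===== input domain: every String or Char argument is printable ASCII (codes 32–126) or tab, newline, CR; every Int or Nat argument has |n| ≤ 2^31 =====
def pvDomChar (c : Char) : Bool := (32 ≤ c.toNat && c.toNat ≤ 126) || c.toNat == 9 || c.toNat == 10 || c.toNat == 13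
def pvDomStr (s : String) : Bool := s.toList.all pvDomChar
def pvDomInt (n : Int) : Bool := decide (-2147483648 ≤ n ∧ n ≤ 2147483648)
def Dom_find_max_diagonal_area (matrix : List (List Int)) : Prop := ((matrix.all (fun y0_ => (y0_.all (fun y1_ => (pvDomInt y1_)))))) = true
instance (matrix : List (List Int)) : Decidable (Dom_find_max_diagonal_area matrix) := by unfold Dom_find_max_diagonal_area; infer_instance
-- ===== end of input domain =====

-- B replaces A's scan-all-cells-and-filter pass by per-row index ranges computed
-- from the two diagonals with a running maximum (no per-cell boolean test, no list built).

-- ===== PORT A =====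
def find_max_diagonal_area (matrix : List (List Int)) : Int :=
  let n : Int := matrix.length
  let selected : List Int :=
    (PySem.List.pyRange 0 n).foldl
      (fun acc i =>
        (PySem.List.pyRange 0 n).foldl
          (fun acc j =>
            if (i ≥ j ∧ i ≤ n - 1 - j) ∨ (i ≤ j ∧ i ≥ n - 1 - j) then
              acc ++ [PySem.List.pyGetD (PySem.List.pyGetD matrix i []) j 0]
            else acc)
          acc)
      []
  -- max(selected_elements): ValueError on an empty list is excluded by Pre_
  (PySem.List.max? selected (fun x => x)).getD 0

-- ===== PORT B =====
-- `if best is None or best < v: best = v`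
def bstep (best : Option Int) (v : Int) : Option Int :=
  match best with
  | none => some v
  | some b => if b < v then some v else some b

def find_max_diagonal_area_alt (matrix : List (List Int)) : Int :=
  let n : Int := matrix.length
  let best : Option Int :=
    (PySem.List.enumerate matrix).foldl
      (fun best p =>
        let i := p.1
        let row := p.2
        let lo := min i (n - 1 - i)
        let hi := max i (n - 1 - i)
        let start := max hi (lo + 1)
        let best :=
          (PySem.List.pyRange 0 (lo + 1)).foldl
            (fun b j => bstep b (PySem.List.pyGetD row j 0)) best
        (PySem.List.pyRange start n).foldl
          (fun b j => bstep b (PySem.List.pyGetD row j 0)) best)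
      none
  -- Python B returns None on an empty matrix (outside Pre_); the port returns 0 there
  best.getD 0

-- ===== PRECONDITION & SPEC =====
-- Pre_ excludes exactly the inputs where A raises: the empty matrix (max([]) is a
-- ValueError) and matrices with a row shorter than len(matrix) (IndexError).
def Pre_find_max_diagonal_area (matrix : List (List Int)) : Prop :=
  matrix ≠ [] ∧ ∀ row ∈ matrix, matrix.length ≤ row.length
instance (matrix : List (List Int)) : Decidable (Pre_find_max_diagonal_area matrix) := by
  unfold Pre_find_max_diagonal_area; infer_instance

def pvWitness_find_max_diagonal_area : List (List Int) := [[3, 1], [2, 4]]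

def Spec_find_max_diagonal_area (matrix : List (List Int)) (out : Int) : Prop := out = find_max_diagonal_area_alt matrix
instance (matrix : List (List Int)) (out : Int) : Decidable (Spec_find_max_diagonal_area matrix out) := by unfold Spec_find_max_diagonal_area; infer_instance

-- ===== CLAIM (what is proved, stated in full; the proofs are below) =====
def Claim_equal_find_max_diagonal_area : Prop := ∀ (matrix : List (List Int)), Dom_find_max_diagonal_area matrix → Pre_find_max_diagonal_area matrix → Spec_find_max_diagonal_area matrix (find_max_diagonal_area matrix)

-- ===== LEMMAS AND PROOFS =====

-- Prop-condition wrapper around PySem.List.foldl_append_if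
theorem foldl_append_ifP (P : Int → Prop) [DecidablePred P] (f : Int → Int)
    (l : List Int) (acc : List Int) :
    l.foldl (fun acc x => if P x then acc ++ [f x] else acc) acc
      = acc ++ (l.filter (fun x => decide (P x))).map f := by
  rw [← PySem.List.foldl_append_if (fun x => decide (P x)) f]
  congr 1
  funext acc x
  by_cases h : P x <;> simp [h]

-- a fold of `bstep` threaded through a list of per-item inner folds is one fold over the flatMap
theorem fold_bstep_flatMap {α : Type} (g : α → List Int) (l : List α) (b : Option Int) :
    l.foldl (fun b x => (g x).foldl bstep b) b = (l.flatMap g).foldl bstep b := by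
  induction l generalizing b with
  | nil => simp
  | cons x xs ih => simp [List.flatMap_cons, List.foldl_append, ih]

-- PySem.List.max? with the identity key is exactly the `bstep` fold
theorem max?_eq_fold_bstep (l : List Int) :
    PySem.List.max? l (fun x => x) = l.foldl bstep none := by
  unfold PySem.List.max?
  congr 1
  funext acc x
  cases acc <;> simp [bstep]

-- enumerate as a map over positions
theorem enumerate_rows (xs : List (List Int)) (s : Int) :
    PySem.List.enumerate xs s
      = (List.range xs.length).map (fun k : Nat => ((s + (k : Int) : Int), xs.getD k [])) := by
  induction xs generalizing s with
  | nil => simp [PySem.List.enumerate]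
  | cons x t ih =>
    simp only [PySem.List.enumerate, ih, List.length_cons, List.range_succ_eq_map,
      List.map_cons, List.map_map]
    congr 1
    · simp
    apply List.map_congr_left
    intro k _
    simp only [Function.comp]
    refine Prod.ext ?_ (by simp)
    push_cast
    ring

-- enumerate over a pyRange of indices
theorem enumerate_pyRange (matrix : List (List Int)) :
    PySem.List.enumerate matrix
      = (PySem.List.pyRange 0 (matrix.length : Int)).map
          (fun i => (i, PySem.List.pyGetD matrix i [])) := by
  rw [enumerate_rows matrix 0, PySem.List.pyRange_zero_natCast, List.map_map]
  apply List.map_congr_left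
  intro k _
  simp [PySem.List.pyGetD_natCast]

-- splitting a filtered range at computed bounds
theorem filter_range_split (n lo start : Int) (h0 : 0 ≤ lo) (h1 : lo < n)
    (h2 : lo + 1 ≤ start) (h3 : start ≤ n) :
    (PySem.List.pyRange 0 n).filter (fun j => decide (j ≤ lo ∨ start ≤ j))
      = PySem.List.pyRange 0 (lo + 1) ++ PySem.List.pyRange start n := by
  rw [PySem.List.pyRange_one_append 0 (lo + 1) n (by omega) (by omega),
    PySem.List.pyRange_one_append (lo + 1) start n (by omega) (by omega),
    List.filter_append, List.filter_append]
  rw [List.filter_eq_self.mpr, List.filter_eq_nil_iff.mpr, List.filter_eq_self.mpr]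
  · simp
  · intro a ha
    rw [PySem.List.mem_pyRange_one] at ha
    simp only [decide_eq_true_eq]
    omega
  · intro a ha
    rw [PySem.List.mem_pyRange_one] at ha
    simp only [decide_eq_true_eq]
    omega
  · intro a ha
    rw [PySem.List.mem_pyRange_one] at ha
    simp only [decide_eq_true_eq]
    omega

-- ===== VERDICT (by name: the statement is the Claim_ definition above) =====
theorem find_max_diagonal_area_spec : Claim_equal_find_max_diagonal_area := by
  intro matrix _ _
  unfold Spec_find_max_diagonal_area find_max_diagonal_area find_max_diagonal_area_alt
  set n : Int := (matrix.length : Int) with hn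
  -- A's selected list as a flatMap of filtered ranges
  have hA : ∀ acc : List Int,
      (PySem.List.pyRange 0 n).foldl
        (fun acc i =>
          (PySem.List.pyRange 0 n).foldl
            (fun acc j =>
              if (i ≥ j ∧ i ≤ n - 1 - j) ∨ (i ≤ j ∧ i ≥ n - 1 - j) then
                acc ++ [PySem.List.pyGetD (PySem.List.pyGetD matrix i []) j 0]
              else acc)
            acc)
        acc
      = acc ++ (PySem.List.pyRange 0 n).flatMap (fun i =>
          ((PySem.List.pyRange 0 n).filter
            (fun j => decide ((i ≥ j ∧ i ≤ n - 1 - j) ∨ (i ≤ j ∧ i ≥ n - 1 - j)))).map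
            (fun j => PySem.List.pyGetD (PySem.List.pyGetD matrix i []) j 0)) := by
    intro acc
    rw [← PySem.List.foldl_append_eq_flatMap]
    congr 1
    funext acc i
    exact foldl_append_ifP _ _ _ _
  -- B's fold as one bstep-fold over a flatMap
  have hB :
      (PySem.List.enumerate matrix).foldl
        (fun best p =>
          let i := p.1
          let row := p.2
          let lo := min i (n - 1 - i)
          let hi := max i (n - 1 - i)
          let start := max hi (lo + 1)
          let best :=
            (PySem.List.pyRange 0 (lo + 1)).foldl
              (fun b j => bstep b (PySem.List.pyGetD row j 0)) best
          (PySem.List.pyRange start n).foldl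
            (fun b j => bstep b (PySem.List.pyGetD row j 0)) best)
        none
      = ((PySem.List.enumerate matrix).flatMap (fun p =>
          (PySem.List.pyRange 0 (min p.1 (n - 1 - p.1) + 1)
            ++ PySem.List.pyRange (max (max p.1 (n - 1 - p.1)) (min p.1 (n - 1 - p.1) + 1)) n).map
            (fun j => PySem.List.pyGetD p.2 j 0))).foldl bstep none := by
    rw [← fold_bstep_flatMap]
    congr 1
    funext b p
    simp only [List.map_append, List.foldl_append, List.foldl_map]
  simp only [hA, hB, List.nil_append, max?_eq_fold_bstep]
  congr 2
  -- the two flatMaps produce the same list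
  rw [enumerate_pyRange matrix, List.flatMap_map, ← hn]
  apply List.flatMap_congr
  intro i hi
  rw [PySem.List.mem_pyRange_one] at hi
  rw [List.filter_congr (q := fun j => decide (j ≤ min i (n - 1 - i) ∨
        max (max i (n - 1 - i)) (min i (n - 1 - i) + 1) ≤ j))
      (by intro j hj; simp only [decide_eq_decide]; omega)]
  rw [filter_range_split n _ _ (by omega) (by omega) (by omega) (by omega)]
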